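-- pv_equiv track=rewrite | github.com/pypi-data/pypi-mirror-182 | packages/bvzframespec/bvzframespec-1.0.2.tar.gz/bvzframespec-1.0.2/src/bvzframespec/bvzframespec.py | _post_cleanup
-- ===== SOURCE A (Python) =====
-- def _post_cleanup(seq_list: list) -> list:
--     """
--     Perform a cleanup of the sequence list. For example, if the original sequence list was [[1, 2], [4, 6, 8, 10]]
--     this function will readjust it so that the sequence list is [[1], [2, 4, 6, 8, 10]]. The difference is that the
--     2 is shifted to the second section where it makes more sense.
--
--     :param seq_list:
--         A list of lists of integers. Example: [[1, 2], [4, 6, 8, 10]]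
--
--     :return:
--         The same list, but with some numbers shifted from one section to another if they make more sense in
--         the new section.
--     """
--
--     # Look at every chunk except the last one
--     for i, curr_chunk in enumerate(seq_list[:-1]):
--
--         # Only deal with chunks that have more than one element
--         if len(curr_chunk) <= 0:
--             continue
--
--         next_chunk = seq_list[i + 1]
--         next_chunk_len = len(next_chunk)
--
--         # Only move items if the next chunk is longer than the current chunk
--         if next_chunk_len <= len(curr_chunk):
--             continue
--
--         curr_chunk_last_value = curr_chunk[-1]
--         next_chunk_first_value = next_chunk[0]
--         curr_to_next_diff = next_chunk_first_value - curr_chunk_last_value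
--
--         # No need to worry about IndexErrors because the next chunk is always > than 1 element long
--         next_chunk_step_size = next_chunk[1] - next_chunk[0]
--
--         # If the step size is the same it means this element probably should be in the next section.
--         if curr_to_next_diff != next_chunk_step_size:
--             continue
--
--         value_to_move = curr_chunk[-1]
--         seq_list[i] = seq_list[i][:-1]
--         seq_list[i + 1] = [value_to_move] + seq_list[i + 1]
--
--     return seq_list
-- ===== SOURCE B (Python) =====
-- def _post_cleanup(seq_list: list) -> list:
--     """Single left-to-right pass with a 'carry' element instead of in-place
--     index juggling: when a chunk's last value continues the next chunk's
--     arithmetic step, hold it as a carry and prepend it to the next chunk."""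
--     out = []
--     carry = []
--     for a, b in zip(seq_list, seq_list[1:]):
--         if len(a) > 0 and len(b) > len(a) and b[0] - a[-1] == b[1] - b[0]:
--             out.append(carry + a[:-1])
--             carry = [a[-1]]
--         else:
--             out.append(carry + a)
--             carry = []
--     if seq_list:
--         out.append(carry + seq_list[-1])
--     seq_list[:] = out
--     return seq_list
-- ===== Notes on version B (the rewrite author's own statement) =====
-- stated objective: simpler
-- what changed: Replaces A's in-place index juggling over enumerate(seq_list[:-1]) (reading and rewriting seq_list[i] and seq_list[i+1]) by a single left-to-right pass over adjacent pairs that carries the moved element forward and emits each output chunk once.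
import Mathlib
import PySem

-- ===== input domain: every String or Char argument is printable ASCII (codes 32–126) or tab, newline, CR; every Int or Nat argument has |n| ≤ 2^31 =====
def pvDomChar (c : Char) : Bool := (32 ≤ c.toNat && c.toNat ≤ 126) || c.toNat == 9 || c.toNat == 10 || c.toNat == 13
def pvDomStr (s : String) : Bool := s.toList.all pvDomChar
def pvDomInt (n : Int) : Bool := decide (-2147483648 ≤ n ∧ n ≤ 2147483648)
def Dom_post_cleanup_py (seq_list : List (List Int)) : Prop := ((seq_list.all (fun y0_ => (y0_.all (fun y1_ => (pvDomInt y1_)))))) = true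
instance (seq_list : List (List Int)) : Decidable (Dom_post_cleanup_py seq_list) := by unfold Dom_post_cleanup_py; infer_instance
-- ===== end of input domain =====

-- B replaces A's in-place index juggling by one left-to-right pass with a 'carry' chunk (objective: simpler);
-- both mutate the argument to the same final contents, and the equivalence proved is about the return value.

-- ===== PORT A =====
-- one loop step: i = p.1 (Python's enumerate index), curr_chunk = p.2 (a chunk of the
-- snapshot seq_list[:-1] taken before the loop; the chunk objects are never mutated)
def postCleanupStepA (L : List (List Int)) (p : Int × List Int) : List (List Int) :=
  let i := p.1
  let curr_chunk := p.2
  if curr_chunk.length ≤ 0 then L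
  else
    -- i+1 is always in range (i ranges over the first len-1 indices), so the guarded total get is exact
    let next_chunk := PySem.List.pyGetD L (i + 1) []
    let next_chunk_len := next_chunk.length
    if next_chunk_len ≤ curr_chunk.length then L
    else
      let curr_chunk_last_value := PySem.List.pyGetD curr_chunk (-1) 0
      let next_chunk_first_value := PySem.List.pyGetD next_chunk 0 0
      let curr_to_next_diff := next_chunk_first_value - curr_chunk_last_value
      let next_chunk_step_size := PySem.List.pyGetD next_chunk 1 0 - PySem.List.pyGetD next_chunk 0 0
      if curr_to_next_diff ≠ next_chunk_step_size then L
      else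
        let value_to_move := PySem.List.pyGetD curr_chunk (-1) 0
        let L1 := PySem.List.pySetD L i (PySem.List.slice (PySem.List.pyGetD L i []) none (some (-1)))
        PySem.List.pySetD L1 (i + 1) (value_to_move :: PySem.List.pyGetD L1 (i + 1) [])

def post_cleanup_py (seq_list : List (List Int)) : List (List Int) :=
  (PySem.List.enumerate (PySem.List.slice seq_list none (some (-1))) 0).foldl postCleanupStepA seq_list

-- ===== PORT B =====
-- one step of Source B's loop over zip(seq_list, seq_list[1:]); state = (out, carry)
def postCleanupStepB (s : List (List Int) × List Int) (p : List Int × List Int) : List (List Int) × List Int :=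
  let out := s.1
  let carry := s.2
  let a := p.1
  let b := p.2
  if a.length > 0 ∧ b.length > a.length ∧
      PySem.List.pyGetD b 0 0 - PySem.List.pyGetD a (-1) 0
        = PySem.List.pyGetD b 1 0 - PySem.List.pyGetD b 0 0 then
    (out ++ [carry ++ PySem.List.slice a none (some (-1))], [PySem.List.pyGetD a (-1) 0])
  else
    (out ++ [carry ++ a], [])

def post_cleanup_py_alt (seq_list : List (List Int)) : List (List Int) :=
  let s := (List.zip seq_list (PySem.List.slice seq_list (some 1) none)).foldl postCleanupStepB ([], [])
  if seq_list ≠ [] then s.1 ++ [s.2 ++ PySem.List.pyGetD seq_list (-1) []] else s.1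

-- ===== PRECONDITION & SPEC =====
def Spec_post_cleanup_py (seq_list : List (List Int)) (out : List (List Int)) : Prop := out = post_cleanup_py_alt seq_list
instance (seq_list : List (List Int)) (out : List (List Int)) : Decidable (Spec_post_cleanup_py seq_list out) := by unfold Spec_post_cleanup_py; infer_instance

-- ===== CLAIM (what is proved, stated in full; the proofs are below) =====
def Claim_equal_post_cleanup_py : Prop := ∀ (seq_list : List (List Int)), Dom_post_cleanup_py seq_list → Spec_post_cleanup_py seq_list (post_cleanup_py seq_list)

-- ===== LEMMAS AND PROOFS =====

-- indexing/assignment into 'prefix of already-emitted chunks ++ working tail'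
theorem pv_getD_append_len {α : Type} (pre : List α) (x : α) (t : List α) (d : α) :
    (pre ++ x :: t).getD pre.length d = x := by
  induction pre with
  | nil => rfl
  | cons p ps ih => simp

theorem pv_getD_append_len1 {α : Type} (pre : List α) (x y : α) (t : List α) (d : α) :
    (pre ++ x :: y :: t).getD (pre.length + 1) d = y := by
  induction pre with
  | nil => rfl
  | cons p ps ih => simp

theorem pv_set_append_len {α : Type} (pre : List α) (x : α) (t : List α) (v : α) :
    (pre ++ x :: t).set pre.length v = pre ++ v :: t := by
  induction pre with
  | nil => rfl
  | cons p ps ih => simp [ih]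

theorem pv_set_append_len1 {α : Type} (pre : List α) (x y : α) (t : List α) (v : α) :
    (pre ++ x :: y :: t).set (pre.length + 1) v = pre ++ x :: v :: t := by
  induction pre with
  | nil => rfl
  | cons p ps ih => simp [ih]

theorem pv_key (rest : List (List Int)) :
    ∀ (a : List Int) (pre : List (List Int)) (carry : List Int),
    (PySem.List.enumerate ((a :: rest).dropLast) (pre.length : Int)).foldl postCleanupStepA
        (pre ++ (carry ++ a) :: rest)
      = (let s := (List.zip (a :: rest) rest).foldl postCleanupStepB (pre, carry)
         s.1 ++ [s.2 ++ (a :: rest).getLast (List.cons_ne_nil a rest)]) := by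
  induction rest with
  | nil =>
    intro a pre carry
    simp [PySem.List.enumerate_nil]
  | cons b rs ih =>
    intro a pre carry
    have hdl : (a :: b :: rs).dropLast = a :: (b :: rs).dropLast := by
      simp [List.dropLast_cons₂]
    rw [hdl, PySem.List.enumerate_cons, List.foldl_cons]
    have hcast : (pre.length : Int) + 1 = ((pre ++ [carry ++ a]).length : Int) := by
      simp
    by_cases ha : a.length ≤ 0
    · -- a is empty: A skips, B takes the else branch with empty carry for the next step
      have ha' : a = [] := by
        cases a with
        | nil => rfl
        | cons z zs => simp at ha
      have hstep : postCleanupStepA (pre ++ (carry ++ a) :: b :: rs) ((pre.length : Int), a)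
          = pre ++ (carry ++ a) :: b :: rs := by
        simp [postCleanupStepA, ha']
      rw [hstep]
      have hAssoc : pre ++ (carry ++ a) :: b :: rs = (pre ++ [carry ++ a]) ++ (([] : List Int) ++ b) :: rs := by
        simp
      rw [hAssoc, hcast]
      have := ih b (pre ++ [carry ++ a]) []
      rw [this]
      simp [postCleanupStepB, ha', List.getLast_cons]
    · -- a nonempty
      have haNe : a ≠ [] := by
        cases a with
        | nil => simp at ha
        | cons z zs => simp
      by_cases hb : b.length ≤ a.length
      · -- next chunk not longer: A skips, B else branch
        have hnext : PySem.List.pyGetD (pre ++ (carry ++ a) :: b :: rs) ((pre.length : Int) + 1) [] = b := by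
          have : ((pre.length : Int) + 1) = ((pre.length + 1 : Nat) : Int) := by push_cast; ring
          rw [this, PySem.List.pyGetD_natCast]
          exact pv_getD_append_len1 pre (carry ++ a) b rs []
        have hstep : postCleanupStepA (pre ++ (carry ++ a) :: b :: rs) ((pre.length : Int), a)
            = pre ++ (carry ++ a) :: b :: rs := by
          simp [postCleanupStepA, ha, hnext, hb]
        rw [hstep]
        have hAssoc : pre ++ (carry ++ a) :: b :: rs = (pre ++ [carry ++ a]) ++ (([] : List Int) ++ b) :: rs := by
          simp
        rw [hAssoc, hcast, ih b (pre ++ [carry ++ a]) []]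
        have hcond : ¬ (a.length > 0 ∧ b.length > a.length ∧
            PySem.List.pyGetD b 0 0 - PySem.List.pyGetD a (-1) 0
              = PySem.List.pyGetD b 1 0 - PySem.List.pyGetD b 0 0) := by
          intro h; exact absurd h.2.1 (not_lt.mpr hb)
        simp [postCleanupStepB, hcond, List.getLast_cons]
      · -- next chunk longer: compare the step-size test
        have hnext : PySem.List.pyGetD (pre ++ (carry ++ a) :: b :: rs) ((pre.length : Int) + 1) [] = b := by
          have : ((pre.length : Int) + 1) = ((pre.length + 1 : Nat) : Int) := by push_cast; ring
          rw [this, PySem.List.pyGetD_natCast]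
          exact pv_getD_append_len1 pre (carry ++ a) b rs []
        by_cases hd : PySem.List.pyGetD b 0 0 - PySem.List.pyGetD a (-1) 0
            = PySem.List.pyGetD b 1 0 - PySem.List.pyGetD b 0 0
        · -- the move happens
          have hcurr : PySem.List.pyGetD (pre ++ (carry ++ a) :: b :: rs) ((pre.length : Int)) [] = carry ++ a := by
            rw [PySem.List.pyGetD_natCast]
            exact pv_getD_append_len pre (carry ++ a) (b :: rs) []
          have hdrop : (carry ++ a).dropLast = carry ++ a.dropLast := List.dropLast_append_of_ne_nil haNe
          have hc1 : ((pre.length : Int) + 1) = ((pre.length + 1 : Nat) : Int) := by push_cast; ring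
          have hstep : postCleanupStepA (pre ++ (carry ++ a) :: b :: rs) ((pre.length : Int), a)
              = pre ++ (carry ++ a.dropLast) :: (PySem.List.pyGetD a (-1) 0 :: b) :: rs := by
            simp only [postCleanupStepA, hnext, hcurr]
            rw [if_neg ha, if_neg (by omega : ¬ b.length ≤ a.length), if_neg (not_not_intro hd)]
            simp only [hc1, PySem.List.pySetD_natCast, PySem.List.pyGetD_natCast,
              PySem.List.slice_to_neg_one, hdrop]
            rw [pv_set_append_len pre (carry ++ a) (b :: rs) (carry ++ a.dropLast),
              pv_getD_append_len1 pre (carry ++ a.dropLast) b rs ([] : List Int),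
              pv_set_append_len1 pre (carry ++ a.dropLast) b rs (PySem.List.pyGetD a (-1) 0 :: b)]
          rw [hstep]
          have hcast' : (pre.length : Int) + 1 = ((pre ++ [carry ++ a.dropLast]).length : Int) := by
            simp
          have hAssoc : pre ++ (carry ++ a.dropLast) :: (PySem.List.pyGetD a (-1) 0 :: b) :: rs
              = (pre ++ [carry ++ a.dropLast]) ++ (([PySem.List.pyGetD a (-1) 0] ++ b)) :: rs := by
            simp
          rw [hAssoc, hcast', ih b (pre ++ [carry ++ a.dropLast]) [PySem.List.pyGetD a (-1) 0]]
          have hcond : (a.length > 0 ∧ b.length > a.length ∧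
              PySem.List.pyGetD b 0 0 - PySem.List.pyGetD a (-1) 0
                = PySem.List.pyGetD b 1 0 - PySem.List.pyGetD b 0 0) := ⟨by omega, by omega, hd⟩
          simp [postCleanupStepB, hcond, PySem.List.slice_to_neg_one, List.getLast_cons]
        · -- step sizes differ: A skips, B else branch
          have hstep : postCleanupStepA (pre ++ (carry ++ a) :: b :: rs) ((pre.length : Int), a)
              = pre ++ (carry ++ a) :: b :: rs := by
            simp [postCleanupStepA, ha, hnext, hb, hd]
          rw [hstep]
          have hAssoc : pre ++ (carry ++ a) :: b :: rs = (pre ++ [carry ++ a]) ++ (([] : List Int) ++ b) :: rs := by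
            simp
          rw [hAssoc, hcast, ih b (pre ++ [carry ++ a]) []]
          have hcond : ¬ (a.length > 0 ∧ b.length > a.length ∧
              PySem.List.pyGetD b 0 0 - PySem.List.pyGetD a (-1) 0
                = PySem.List.pyGetD b 1 0 - PySem.List.pyGetD b 0 0) := by
            intro h; exact hd h.2.2
          simp [postCleanupStepB, hcond, List.getLast_cons]

-- ===== VERDICT (by name: the statement is the Claim_ definition above) =====
theorem post_cleanup_py_spec : Claim_equal_post_cleanup_py := by
  intro seq_list _
  unfold Spec_post_cleanup_py post_cleanup_py post_cleanup_py_alt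
  cases seq_list with
  | nil => simp [PySem.List.slice, PySem.List.enumerate_nil]
  | cons a rest =>
    rw [PySem.List.slice_to_neg_one, PySem.List.slice_from_one]
    have h0 : (0 : Int) = (([] : List (List Int)).length : Int) := by simp
    have := pv_key rest a [] []
    simp only [List.nil_append, List.length_nil, Nat.cast_zero] at this
    rw [this]
    have hne : (a :: rest) ≠ [] := List.cons_ne_nil a rest
    rw [PySem.List.pyGetD_neg_one (a :: rest) [] hne]
    simp [hne]
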